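-- pv_equiv track=rewrite | github.com/alehdezp/alphaswarm-sol | src/alphaswarm_sol/knowledge/vulndocs/builder.py | _format_operations_summary
-- ===== SOURCE A (Python) =====
-- from typing import Any, Dict, List, Optional, TYPE_CHECKING
--
-- def _format_operations_summary(
--     operations: List[str], categories: List[str]
-- ) -> str:
--     """Format operations summary."""
--     lines = [
--         "## Operations Analysis",
--         "",
--         "**Detected Operations:**",
--     ]
--     for op in operations:
--         lines.append(f"- `{op}`")
--
--     lines.append("")
--     lines.append("**Relevant Vulnerability Categories:**")
--     for cat in categories:
--         lines.append(f"- `{cat}`")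
--
--     lines.append("")
--     lines.append("Consider checking for:")
--     if any("VALUE" in op or "BALANCE" in op for op in operations):
--         lines.append("- Reentrancy vulnerabilities")
--         lines.append("- Token transfer issues")
--     if any("PERMISSION" in op or "OWNER" in op or "ROLE" in op for op in operations):
--         lines.append("- Access control weaknesses")
--     if any("EXTERNAL" in op or "ORACLE" in op for op in operations):
--         lines.append("- External call safety")
--         lines.append("- Price oracle manipulation")
--
--     return "\n".join(lines)
-- ===== SOURCE B (Python) =====
-- from typing import List
--
-- KEYWORDS = ("VALUE", "BALANCE", "PERMISSION", "OWNER", "ROLE", "EXTERNAL", "ORACLE")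
-- RULES = (
--     (("VALUE", "BALANCE"),
--      "- Reentrancy vulnerabilities\n- Token transfer issues"),
--     (("PERMISSION", "OWNER", "ROLE"),
--      "- Access control weaknesses"),
--     (("EXTERNAL", "ORACLE"),
--      "- External call safety\n- Price oracle manipulation"),
-- )
--
-- def _bullets(items: List[str]) -> str:
--     return "".join(f"- `{x}`\n" for x in items)
--
-- def _format_operations_summary(
--     operations: List[str], categories: List[str]
-- ) -> str:
--     """Format operations summary (keyword-set + data-driven rule table)."""
--     present = {kw for op in operations for kw in KEYWORDS if kw in op}
--     return (
--         "## Operations Analysis\n\n**Detected Operations:**\n"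
--         + _bullets(operations)
--         + "\n**Relevant Vulnerability Categories:**\n"
--         + _bullets(categories)
--         + "\nConsider checking for:"
--         + "".join("\n" + advice for kws, advice in RULES
--                   if not present.isdisjoint(kws))
--     )
-- ===== Notes on version B (the rewrite author's own statement) =====
-- stated objective: alternative
-- what changed: Replaced the imperative line-list built by append loops, three hard-coded any() scans and a final join with a data-driven design: a keyword->advice rule table, a set comprehension collecting the keywords present in the operations, bullet-block helpers, and one concatenation expression of section strings filtered through the rule table.
import Mathlib
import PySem

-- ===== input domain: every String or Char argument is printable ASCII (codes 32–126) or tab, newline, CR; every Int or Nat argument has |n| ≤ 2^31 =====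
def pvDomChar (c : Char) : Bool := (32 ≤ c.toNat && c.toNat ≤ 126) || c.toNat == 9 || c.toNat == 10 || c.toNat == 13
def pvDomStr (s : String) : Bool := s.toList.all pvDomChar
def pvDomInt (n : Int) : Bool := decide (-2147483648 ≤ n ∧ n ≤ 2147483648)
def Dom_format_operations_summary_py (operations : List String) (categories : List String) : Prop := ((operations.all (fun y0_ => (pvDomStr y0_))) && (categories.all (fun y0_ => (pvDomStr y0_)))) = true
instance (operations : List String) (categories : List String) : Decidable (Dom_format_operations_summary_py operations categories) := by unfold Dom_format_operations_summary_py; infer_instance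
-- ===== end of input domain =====

-- B replaces A's line-list/append/join construction and three hard-coded any() scans with a
-- data-driven design: a keyword->advice rule table, a set of keywords present in the operations,
-- and direct string concatenation of the sections; same output, same O(n) cost.

-- ===== PORT A =====
def format_operations_summary_py (operations : List String) (categories : List String) : String :=
  let lines : List String := ["## Operations Analysis", "", "**Detected Operations:**"]
  let lines := operations.foldl (fun acc op => acc ++ ["- `" ++ op ++ "`"]) lines
  let lines := lines ++ [""]
  let lines := lines ++ ["**Relevant Vulnerability Categories:**"]
  let lines := categories.foldl (fun acc cat => acc ++ ["- `" ++ cat ++ "`"]) lines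
  let lines := lines ++ [""]
  let lines := lines ++ ["Consider checking for:"]
  let lines := if operations.any (fun op => PySem.Str.isIn "VALUE" op || PySem.Str.isIn "BALANCE" op)
    then lines ++ ["- Reentrancy vulnerabilities"] ++ ["- Token transfer issues"] else lines
  let lines := if operations.any (fun op => PySem.Str.isIn "PERMISSION" op || PySem.Str.isIn "OWNER" op || PySem.Str.isIn "ROLE" op)
    then lines ++ ["- Access control weaknesses"] else lines
  let lines := if operations.any (fun op => PySem.Str.isIn "EXTERNAL" op || PySem.Str.isIn "ORACLE" op)
    then lines ++ ["- External call safety"] ++ ["- Price oracle manipulation"] else lines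
  PySem.Str.join "\n" lines

-- ===== PORT B =====
def fosKeywords : List String := ["VALUE", "BALANCE", "PERMISSION", "OWNER", "ROLE", "EXTERNAL", "ORACLE"]

def fosRules : List (List String × String) :=
  [(["VALUE", "BALANCE"], "- Reentrancy vulnerabilities\n- Token transfer issues"),
   (["PERMISSION", "OWNER", "ROLE"], "- Access control weaknesses"),
   (["EXTERNAL", "ORACLE"], "- External call safety\n- Price oracle manipulation")]

-- ''.join(f"- `{x}`\n" for x in items)
def fosBullets (items : List String) : String :=
  PySem.Str.join "" (items.map (fun x => "- `" ++ x ++ "`\n"))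

-- the set comprehension {kw for op in operations for kw in KEYWORDS if kw in op}
def fosPresent (operations : List String) : PySem.Set String :=
  PySem.Set.ofList (operations.flatMap (fun op => fosKeywords.filter (fun kw => PySem.Str.isIn kw op)))

def format_operations_summary_py_alt (operations : List String) (categories : List String) : String :=
  let present := fosPresent operations
  "## Operations Analysis\n\n**Detected Operations:**\n"
  ++ fosBullets operations
  ++ "\n**Relevant Vulnerability Categories:**\n"
  ++ fosBullets categories
  ++ "\nConsider checking for:"
  ++ PySem.Str.join "" ((fosRules.filter (fun r => !(PySem.Set.isdisjoint present r.1))).map (fun r => "\n" ++ r.2))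

-- ===== PRECONDITION & SPEC =====
def Spec_format_operations_summary_py (operations : List String) (categories : List String) (out : String) : Prop := out = format_operations_summary_py_alt operations categories
instance (operations : List String) (categories : List String) (out : String) : Decidable (Spec_format_operations_summary_py operations categories out) := by unfold Spec_format_operations_summary_py; infer_instance

-- ===== CLAIM (what is proved, stated in full; the proofs are below) =====
def Claim_equal_format_operations_summary_py : Prop := ∀ (operations : List String) (categories : List String), Dom_format_operations_summary_py operations categories → Spec_format_operations_summary_py operations categories (format_operations_summary_py operations categories)

-- ===== LEMMAS AND PROOFS =====

-- membership in the present-keyword set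
theorem mem_fosPresent (operations : List String) (kw : String) :
    kw ∈ fosPresent operations ↔ kw ∈ fosKeywords ∧ ∃ op ∈ operations, PySem.Str.isIn kw op := by
  simp [fosPresent, PySem.Set.mem_ofList, List.mem_flatMap, List.mem_filter]
  tauto

-- B's isdisjoint test on a rule's keyword list computes A's any() scan (negated)
theorem fosDisj_eq (operations : List String) (kws : List String)
    (h : ∀ kw ∈ kws, kw ∈ fosKeywords) :
    PySem.Set.isdisjoint (fosPresent operations) kws =
      !operations.any (fun op => kws.any (fun kw => PySem.Str.isIn kw op)) := by
  rcases hany : operations.any (fun op => kws.any (fun kw => PySem.Str.isIn kw op)) with _ | _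
  · simp only [Bool.not_false]
    rw [PySem.Set.isdisjoint_iff]
    intro x hx hxk
    rw [mem_fosPresent] at hx
    rcases hx with ⟨-, op, hop, hin⟩
    have := List.any_eq_false.mp hany op hop
    simp only [List.any_eq_true, not_exists, not_and] at this
    exact absurd hin (by simpa using this x hxk)
  · simp only [Bool.not_true]
    rcases List.any_eq_true.mp hany with ⟨op, hop, hk⟩
    rcases List.any_eq_true.mp hk with ⟨kw, hkw, hin⟩
    have hmem : kw ∈ fosPresent operations := (mem_fosPresent _ _).mpr ⟨h kw hkw, op, hop, hin⟩
    rcases hd : PySem.Set.isdisjoint (fosPresent operations) kws with _ | _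
    · rfl
    · exact absurd hkw (PySem.Set.isdisjoint_iff _ _ |>.mp hd kw hmem)

-- "\n".join(a :: l) as a flat list of chars, '\n' prefixed to each tail element
theorem join_head (a : List Char) (l : List (List Char)) :
    PySem.Chars.join ['\n'] (a :: l) = a ++ (l.map (fun x => '\n' :: x)).flatten := by
  induction l generalizing a with
  | nil => simp [PySem.Chars.join_singleton]
  | cons b rest ih =>
      rw [PySem.Chars.join_cons_cons, ih b]
      simp

-- moving the newline from prefix position to suffix position across a mapped block
theorem nl_shift {α : Type} (xs : List α) (f : α → List Char) (r : List Char) :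
    (xs.map (fun x => '\n' :: f x)).flatten ++ '\n' :: r =
      '\n' :: ((xs.map (fun x => f x ++ ['\n'])).flatten ++ r) := by
  induction xs with
  | nil => simp
  | cons x t ih => simp [ih]

-- ''.join = flatten on the char-list side
theorem join_empty (l : List (List Char)) :
    PySem.Chars.join [] l = l.flatten := by
  induction l with
  | nil => simp [PySem.Chars.join_nil]
  | cons a t ih =>
      cases t with
      | nil => simp [PySem.Chars.join_singleton]
      | cons b r => rw [PySem.Chars.join_cons_cons, ih]; simp

-- ===== VERDICT (by name: the statement is the Claim_ definition above) =====
set_option maxRecDepth 8192 in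
theorem format_operations_summary_py_spec : Claim_equal_format_operations_summary_py := by
  intro operations categories _
  show format_operations_summary_py operations categories = format_operations_summary_py_alt operations categories
  unfold format_operations_summary_py format_operations_summary_py_alt
  have h1 := fosDisj_eq operations ["VALUE", "BALANCE"] (by decide)
  have h2 := fosDisj_eq operations ["PERMISSION", "OWNER", "ROLE"] (by decide)
  have h3 := fosDisj_eq operations ["EXTERNAL", "ORACLE"] (by decide)
  simp only [List.any_cons, List.any_nil, Bool.or_false] at h1 h2 h3
  simp only [← Bool.or_assoc] at h2
  apply String.toList_injective
  rcases hc1 : operations.any (fun op => PySem.Str.isIn "VALUE" op || PySem.Str.isIn "BALANCE" op) with _ | _ <;>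
  rcases hc2 : operations.any (fun op => PySem.Str.isIn "PERMISSION" op || PySem.Str.isIn "OWNER" op || PySem.Str.isIn "ROLE" op) with _ | _ <;>
  rcases hc3 : operations.any (fun op => PySem.Str.isIn "EXTERNAL" op || PySem.Str.isIn "ORACLE" op) with _ | _ <;>
  · simp only [hc1, hc2, hc3, h1, h2, h3, Bool.not_true, Bool.not_false, fosRules,
      List.filter_cons, List.filter_nil, Bool.false_eq_true, reduceIte,
      PySem.List.foldl_append_singleton_eq_map, List.append_assoc]
    simp [fosBullets, PySem.Str.toList_join, join_head, join_empty, nl_shift,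
      Function.comp_def, List.append_assoc]
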